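-- pv_equiv track=rewrite | github.com/bucknercd/forge | forge/vertical_slice_json.py | _pick_longest_unique_block
-- ===== SOURCE A (Python) =====
-- def _pick_longest_unique_block(blocks: list[str]) -> str:
--     if not blocks:
--         raise ValueError(
--             "no balanced {...} substring parsed as a JSON object (truncated or malformed JSON?)"
--         )
--     max_len = max(len(b) for b in blocks)
--     at_max = [b for b in blocks if len(b) == max_len]
--     uniq = set(at_max)
--     if len(uniq) > 1:
--         raise ValueError(
--             f"ambiguous: {len(uniq)} distinct JSON objects tie for longest length; refuse to guess"
--         )
--     return at_max[0]
-- ===== SOURCE B (Python) =====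
-- def _pick_longest_unique_block(blocks: list[str]) -> str:
--     if not blocks:
--         raise ValueError(
--             "no balanced {...} substring parsed as a JSON object (truncated or malformed JSON?)"
--         )
--     best = blocks[0]
--     tied = {best}
--     for b in blocks[1:]:
--         if len(b) > len(best):
--             best = b
--             tied = {b}
--         elif len(b) == len(best):
--             tied.add(b)
--     if len(tied) > 1:
--         raise ValueError(
--             f"ambiguous: {len(tied)} distinct JSON objects tie for longest length; refuse to guess"
--         )
--     return best
-- ===== Notes on version B (the rewrite author's own statement) =====
-- stated objective: alternative
-- what changed: Replaced the three separate passes (max over lengths, filter to the max length, set-dedupe, index) with one loop that maintains the current best block and the set of distinct blocks tied at the best length.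
import Mathlib
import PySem

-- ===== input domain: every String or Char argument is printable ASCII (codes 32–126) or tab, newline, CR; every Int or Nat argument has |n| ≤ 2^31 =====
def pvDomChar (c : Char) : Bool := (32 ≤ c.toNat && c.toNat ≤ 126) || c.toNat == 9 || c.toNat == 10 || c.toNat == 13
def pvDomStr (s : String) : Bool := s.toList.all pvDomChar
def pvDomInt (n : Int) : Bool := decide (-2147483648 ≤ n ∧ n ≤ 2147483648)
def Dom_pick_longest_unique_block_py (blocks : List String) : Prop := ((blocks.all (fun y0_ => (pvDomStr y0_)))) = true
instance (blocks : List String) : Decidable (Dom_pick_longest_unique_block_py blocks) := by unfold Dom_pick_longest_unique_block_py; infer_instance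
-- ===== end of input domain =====

-- B replaces A's three passes (max over lengths, filter-to-max, set-dedupe, index) by one loop keeping
-- the current best block and the set of blocks tied at the best length (alternative decomposition, same cost).


-- ===== PORT A =====
-- max_len = max(len(b) for b in blocks); at_max = [b for b in blocks if len(b) == max_len];
-- uniq = set(at_max); both 'raise ValueError' paths return "" and are excluded by Pre_.
def pick_longest_unique_block_py (blocks : List String) : String :=
  if blocks = [] then ""  -- raise ValueError (excluded by Pre_)
  else
    let max_len := (PySem.List.max? (blocks.map (fun b => PySem.Str.len b)) (fun x => x)).getD 0
    let at_max := blocks.filter (fun b => PySem.Str.len b == max_len)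
    let uniq := PySem.Set.ofList at_max
    if 1 < PySem.Set.len uniq then ""  -- raise ValueError (excluded by Pre_)
    else (PySem.List.pyGet? at_max 0).getD ""  -- at_max[0]; at_max ≠ [] when blocks ≠ []

-- ===== PORT B =====
-- one loop step: a strictly longer block resets best and the tie set; an equal-length block joins the tie set
def pvAltStep (st : String × PySem.Set String) (b : String) : String × PySem.Set String :=
  if PySem.Str.len st.1 < PySem.Str.len b then (b, PySem.Set.add PySem.Set.empty b)
  else if PySem.Str.len b == PySem.Str.len st.1 then (st.1, PySem.Set.add st.2 b)
  else st

def pick_longest_unique_block_py_alt (blocks : List String) : String :=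
  match blocks with
  | [] => ""  -- raise ValueError (excluded by Pre_)
  | b0 :: rest =>
    let st := rest.foldl pvAltStep (b0, PySem.Set.add PySem.Set.empty b0)
    if 1 < PySem.Set.len st.2 then ""  -- raise ValueError (excluded by Pre_)
    else st.1

-- ===== PRECONDITION & SPEC =====
-- Pre_ excludes exactly the inputs where the Python A raises ValueError: the empty list, and
-- lists on which two DISTINCT blocks tie for the maximal length (the ambiguity error).
def Pre_pick_longest_unique_block_py (blocks : List String) : Prop :=
  blocks ≠ [] ∧
  ∀ b ∈ blocks, ∀ c ∈ blocks,
    (∀ d ∈ blocks, PySem.Str.len d ≤ PySem.Str.len b) →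
    PySem.Str.len c = PySem.Str.len b → c = b
instance (blocks : List String) : Decidable (Pre_pick_longest_unique_block_py blocks) := by
  unfold Pre_pick_longest_unique_block_py; infer_instance
def pvWitness_pick_longest_unique_block_py : List String := ["{\"a\":1}", "{}", "{\"a\":1}"]
def Spec_pick_longest_unique_block_py (blocks : List String) (out : String) : Prop := out = pick_longest_unique_block_py_alt blocks
instance (blocks : List String) (out : String) : Decidable (Spec_pick_longest_unique_block_py blocks out) := by unfold Spec_pick_longest_unique_block_py; infer_instance

-- ===== CLAIM (what is proved, stated in full; the proofs are below) =====
def Claim_equal_pick_longest_unique_block_py : Prop := ∀ (blocks : List String), Dom_pick_longest_unique_block_py blocks → Pre_pick_longest_unique_block_py blocks → Spec_pick_longest_unique_block_py blocks (pick_longest_unique_block_py blocks)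

-- ===== LEMMAS AND PROOFS =====
-- A's max_len and at_max, as functions of the list (used only by the proofs)
def pvML (l : List String) : Int := (PySem.List.max? (l.map (fun b => PySem.Str.len b)) (fun x => x)).getD 0
def pvAM (l : List String) : List String := l.filter (fun b => PySem.Str.len b == pvML l)

lemma pvML_cons (b0 : String) (t : List String) :
    pvML (b0 :: t) = (t.map (fun b => PySem.Str.len b)).foldl max (PySem.Str.len b0) := by
  simp [pvML, PySem.List.max?_id_cons]

lemma pvML_append_singleton (q : List String) (hq : q ≠ []) (c : String) :
    pvML (q ++ [c]) = max (pvML q) (PySem.Str.len c) := by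
  obtain ⟨b0, t, rfl⟩ := List.exists_cons_of_ne_nil hq
  simp [pvML_cons, List.foldl_append]

lemma pvML_some (q : List String) (hq : q ≠ []) :
    ∃ m, PySem.List.max? (q.map (fun b => PySem.Str.len b)) (fun x => x) = some m := by
  apply Option.ne_none_iff_exists'.1
  intro h
  exact hq (by simpa using (PySem.List.max?_eq_none_iff _ _).1 h)

lemma pvML_isMax (q : List String) (b : String) (hb : b ∈ q) :
    PySem.Str.len b ≤ pvML q := by
  obtain ⟨m, hm⟩ := pvML_some q (by rintro rfl; simp at hb)
  have := PySem.List.max?_isMax (key := fun y => y) hm (PySem.Str.len b) (List.mem_map_of_mem hb)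
  rw [pvML, hm, Option.getD_some]
  exact this

lemma pvAM_ne_nil (q : List String) (hq : q ≠ []) : pvAM q ≠ [] := by
  obtain ⟨m, hm⟩ := pvML_some q hq
  obtain ⟨b, hb, hbl⟩ := List.mem_map.1 (PySem.List.max?_mem hm)
  have hmem : b ∈ pvAM q := by
    apply List.mem_filter.2
    refine ⟨hb, ?_⟩
    rw [pvML, hm, Option.getD_some, hbl]
    simp
  exact fun h => by simp [h] at hmem

lemma mem_pvAM_len (q : List String) (b : String) (hb : b ∈ pvAM q) :
    PySem.Str.len b = pvML q := by
  have := (List.mem_filter.1 hb).2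
  simpa using this

lemma pvAM_append_gt (q : List String) (c : String) (h : ∀ b ∈ q, PySem.Str.len b < PySem.Str.len c)
    (hml : pvML (q ++ [c]) = PySem.Str.len c) :
    pvAM (q ++ [c]) = [c] := by
  unfold pvAM
  rw [List.filter_append, hml]
  have h1 : q.filter (fun b => PySem.Str.len b == PySem.Str.len c) = [] :=
    List.filter_eq_nil_iff.2 (fun b hb => by simpa using ne_of_lt (h b hb))
  rw [h1]
  simp

lemma pvAM_append_tie (q : List String) (c : String) (hml : pvML (q ++ [c]) = pvML q)
    (hc : PySem.Str.len c = pvML q) :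
    pvAM (q ++ [c]) = pvAM q ++ [c] := by
  unfold pvAM
  rw [List.filter_append, hml]
  have hc' := hc
  simp at hc'
  simp [hc']

lemma pvAM_append_lt (q : List String) (c : String) (hml : pvML (q ++ [c]) = pvML q)
    (hc : PySem.Str.len c ≠ pvML q) :
    pvAM (q ++ [c]) = pvAM q := by
  unfold pvAM
  rw [List.filter_append, hml]
  have h1 : [c].filter (fun b => PySem.Str.len b == pvML q) = [] := by
    simpa using hc
  rw [h1]
  simp

-- the loop invariant: after the prefix q, the state is (head of at_max(q), set(at_max(q)))
lemma pvStep_invariant (q : List String) (hq : q ≠ []) (c : String) :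
    pvAltStep ((pvAM q).head?.getD "", PySem.Set.ofList (pvAM q)) c
      = ((pvAM (q ++ [c])).head?.getD "", PySem.Set.ofList (pvAM (q ++ [c]))) := by
  obtain ⟨h0, ht, hAMeq⟩ := List.exists_cons_of_ne_nil (pvAM_ne_nil q hq)
  have hlen0 : PySem.Str.len h0 = pvML q :=
    mem_pvAM_len q h0 (by rw [hAMeq]; exact List.mem_cons_self)
  have hml := pvML_append_singleton q hq c
  rw [hAMeq, List.head?_cons, Option.getD_some]
  unfold pvAltStep
  rcases lt_trichotomy (pvML q) (PySem.Str.len c) with hlt | heq | hgt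
  · -- strictly longer: reset best and the tie set
    have hml' : pvML (q ++ [c]) = PySem.Str.len c := by rw [hml]; exact max_eq_right (le_of_lt hlt)
    have hAMnew : pvAM (q ++ [c]) = [c] :=
      pvAM_append_gt q c (fun b hb => lt_of_le_of_lt (pvML_isMax q b hb) hlt) hml'
    rw [if_pos (show PySem.Str.len h0 < PySem.Str.len c by rw [hlen0]; exact hlt), hAMnew]
    rfl
  · -- tie: keep best, add to the tie set
    have hml' : pvML (q ++ [c]) = pvML q := by rw [hml, ← heq, max_self]
    have hAMnew : pvAM (q ++ [c]) = pvAM q ++ [c] := pvAM_append_tie q c hml' heq.symm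
    have hnl : ¬ PySem.Str.len h0 < PySem.Str.len c := by rw [hlen0, heq]; exact lt_irrefl _
    have hbeq : PySem.Str.len c == PySem.Str.len h0 := beq_iff_eq.2 (by rw [hlen0]; exact heq.symm)
    have hset : PySem.Set.ofList ((h0 :: ht) ++ [c]) = PySem.Set.add (PySem.Set.ofList (h0 :: ht)) c := by
      simp [PySem.Set.ofList_eq_foldl, List.foldl_append]
    rw [if_neg hnl, if_pos hbeq, hAMnew, hAMeq, hset, List.cons_append, List.head?_cons,
        Option.getD_some]
  · -- strictly shorter: state unchanged
    have hml' : pvML (q ++ [c]) = pvML q := by rw [hml]; exact max_eq_left (le_of_lt hgt)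
    have hAMnew : pvAM (q ++ [c]) = pvAM q := pvAM_append_lt q c hml' (ne_of_lt hgt)
    have hnl : ¬ PySem.Str.len h0 < PySem.Str.len c := by rw [hlen0]; exact not_lt.2 (le_of_lt hgt)
    have hbeq : (PySem.Str.len c == PySem.Str.len h0) = false :=
      beq_eq_false_iff_ne.2 (by rw [hlen0]; exact ne_of_lt hgt)
    rw [if_neg hnl, if_neg (by rw [hbeq]; simp), hAMnew, hAMeq, List.head?_cons, Option.getD_some]

lemma pvFold_invariant (rest : List String) : ∀ (q : List String), q ≠ [] →
    rest.foldl pvAltStep ((pvAM q).head?.getD "", PySem.Set.ofList (pvAM q))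
      = ((pvAM (q ++ rest)).head?.getD "", PySem.Set.ofList (pvAM (q ++ rest))) := by
  induction rest with
  | nil => intro q hq; simp
  | cons c rest ih =>
    intro q hq
    rw [show q ++ c :: rest = (q ++ [c]) ++ rest by simp, List.foldl_cons,
        pvStep_invariant q hq c, ih (q ++ [c]) (by simp)]

lemma pvInit_state (b0 : String) :
    (b0, PySem.Set.add PySem.Set.empty b0)
      = ((pvAM [b0]).head?.getD "", PySem.Set.ofList (pvAM [b0])) := by
  have h : pvAM [b0] = [b0] := by
    simp [pvAM, pvML, PySem.List.max?, List.filter]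
  rw [h]
  simp [PySem.Set.add, PySem.Set.empty, PySem.Set.ofList_eq_foldl, PySem.Set.contains]

lemma pvPorts_agree (blocks : List String) :
    pick_longest_unique_block_py blocks = pick_longest_unique_block_py_alt blocks := by
  match blocks with
  | [] => rfl
  | b0 :: rest =>
    have hstep : rest.foldl pvAltStep (b0, PySem.Set.add PySem.Set.empty b0)
        = ((pvAM (b0 :: rest)).head?.getD "", PySem.Set.ofList (pvAM (b0 :: rest))) := by
      rw [pvInit_state b0, pvFold_invariant rest [b0] (by simp), List.singleton_append]
    show (if (b0 :: rest : List String) = [] then ""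
          else
            if 1 < PySem.Set.len (PySem.Set.ofList (pvAM (b0 :: rest))) then ""
            else (PySem.List.pyGet? (pvAM (b0 :: rest)) 0).getD "")
        = (if 1 < PySem.Set.len (rest.foldl pvAltStep (b0, PySem.Set.add PySem.Set.empty b0)).2 then ""
           else (rest.foldl pvAltStep (b0, PySem.Set.add PySem.Set.empty b0)).1)
    rw [hstep, if_neg (by simp : ¬ (b0 :: rest : List String) = [])]
    by_cases hc : 1 < PySem.Set.len (PySem.Set.ofList (pvAM (b0 :: rest)))
    · rw [if_pos hc, if_pos hc]
    · rw [if_neg hc, if_neg hc]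
      obtain ⟨h0, ht, hAMeq⟩ := List.exists_cons_of_ne_nil (pvAM_ne_nil (b0 :: rest) (by simp))
      rw [hAMeq]
      simp [PySem.List.pyGet?, PySem.List.pyIdx?]

-- ===== VERDICT (by name: the statement is the Claim_ definition above) =====
theorem pick_longest_unique_block_py_spec : Claim_equal_pick_longest_unique_block_py := by
  intro blocks _ _
  unfold Spec_pick_longest_unique_block_py
  exact pvPorts_agree blocks
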